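-- pv_equiv track=rewrite | github.com/allenai/drug-combo-extraction | dataset_conversion/convert_scierc.py | detokenize_sentence
-- ===== SOURCE A (Python) =====
-- from typing import List, Dict, Tuple
--
-- def detokenize_sentence(tokens: List[str], token_index_offset: int) -> Tuple[str, Dict[int, Tuple[int, int]]]:
--     """Converts a list of tokens into a sentence, which can be tokenized later by applications.
--     To comply with this, update entity span indices to be span character indices instead of token indices.
--
--     Args:
--         tokens: List of tokens (representing a tokenized sentence)
--         token_index_offset: Number of tokens prior to this sentence in the containing paragraph, because our token-character index
--                             mapping must correspond to positions in the entire paragraph.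
--         char_index_offset: Number of characters prior to this sentence in the containing paragraph.
--
--     Returns:
--         detokenized_sentence: Single string representing the detokenized sentence.
--         token_char_mapping: Mapping from paragraph-level token indices to character indices for each token in the sentence.
--     """
--
--     detokenized_sentence = ""
--     token_char_mapping = {}
--     token_start_idx = 0
--     for i, token in enumerate(tokens):
--         paragraph_idx = token_index_offset + i
--         token_end_idx = token_start_idx + len(token)
--         token_char_mapping[paragraph_idx] = (token_start_idx, token_end_idx)
--         detokenized_sentence = detokenized_sentence + token + " "
--         token_start_idx += len(token) + 1
--     detokenized_sentence = detokenized_sentence[:-1]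
--     return detokenized_sentence, token_char_mapping
-- ===== SOURCE B (Python) =====
-- from typing import List, Dict, Tuple
--
-- def detokenize_sentence(tokens: List[str], token_index_offset: int) -> Tuple[str, Dict[int, Tuple[int, int]]]:
--     sentence = " ".join(tokens)
--     starts = [0]
--     for t in tokens:
--         starts.append(starts[-1] + len(t) + 1)
--     token_char_mapping = {token_index_offset + i: (starts[i], starts[i] + len(t))
--                           for i, t in enumerate(tokens)}
--     return sentence, token_char_mapping
-- ===== Notes on version B (the rewrite author's own statement) =====
-- stated objective: faster
-- what changed: Replaces the single intertwined pass that grows the string by repeated concatenation and tracks a running char index by ' '.join(tokens) plus a separately built prefix table of token start offsets consumed by a dict comprehension.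
import Mathlib
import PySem

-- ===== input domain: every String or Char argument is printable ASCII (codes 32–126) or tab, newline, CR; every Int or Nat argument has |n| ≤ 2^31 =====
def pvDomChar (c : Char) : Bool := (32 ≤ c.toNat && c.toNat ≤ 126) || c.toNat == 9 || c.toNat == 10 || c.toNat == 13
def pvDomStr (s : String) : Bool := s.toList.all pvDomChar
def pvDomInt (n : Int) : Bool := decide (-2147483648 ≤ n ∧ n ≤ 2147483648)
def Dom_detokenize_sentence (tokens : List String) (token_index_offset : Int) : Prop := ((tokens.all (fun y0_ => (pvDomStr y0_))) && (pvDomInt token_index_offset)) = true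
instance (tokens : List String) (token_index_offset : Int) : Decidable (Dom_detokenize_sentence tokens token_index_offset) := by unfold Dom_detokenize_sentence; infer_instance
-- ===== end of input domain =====

-- B detokenizes with " ".join plus a separately built prefix table of start offsets instead of A's single intertwined pass that grows the string by repeated concatenation (measured faster at large sizes).
-- String concatenation/slicing is ported on List Char (exact; Lean's own String append is kernel-opaque); the dict (always-fresh keys off+i) is ported as an append-built association list.

-- ===== PORT A =====
def detokenize_sentence (tokens : List String) (token_index_offset : Int) : String × (List (Int × Int × Int)) :=
  -- state: (detokenized_sentence as chars, token_char_mapping, token_start_idx)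
  let st := (PySem.List.enumerate tokens).foldl
    (fun (acc : List Char × List (Int × Int × Int) × Int) p =>
      let paragraph_idx := token_index_offset + p.1
      let token_end_idx := acc.2.2 + PySem.Str.len p.2
      (acc.1 ++ p.2.toList ++ [' '],
       acc.2.1 ++ [(paragraph_idx, acc.2.2, token_end_idx)],
       acc.2.2 + PySem.Str.len p.2 + 1))
    ([], [], 0)
  (String.ofList (PySem.List.slice st.1 none (some (-1))), st.2.1)

-- ===== PORT B =====
def detokenize_sentence_alt (tokens : List String) (token_index_offset : Int) : String × (List (Int × Int × Int)) :=
  let sentence := PySem.Str.join " " tokens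
  let starts := tokens.foldl
    (fun st t => st ++ [PySem.List.pyGetD st (-1) 0 + PySem.Str.len t + 1]) [(0 : Int)]
  let mapping := (PySem.List.enumerate tokens).map
    (fun p => (token_index_offset + p.1,
               PySem.List.pyGetD starts p.1 0,
               PySem.List.pyGetD starts p.1 0 + PySem.Str.len p.2))
  (sentence, mapping)

-- ===== PRECONDITION & SPEC =====
def Spec_detokenize_sentence (tokens : List String) (token_index_offset : Int) (out : String × (List (Int × Int × Int))) : Prop := out = detokenize_sentence_alt tokens token_index_offset
instance (tokens : List String) (token_index_offset : Int) (out : String × (List (Int × Int × Int))) : Decidable (Spec_detokenize_sentence tokens token_index_offset out) := by unfold Spec_detokenize_sentence; infer_instance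

-- ===== CLAIM (what is proved, stated in full; the proofs are below) =====
def Claim_equal_detokenize_sentence : Prop := ∀ (tokens : List String) (token_index_offset : Int), Dom_detokenize_sentence tokens token_index_offset → Spec_detokenize_sentence tokens token_index_offset (detokenize_sentence tokens token_index_offset)

-- ===== LEMMAS AND PROOFS =====

-- Reference mapping both ports are reduced to: entry i is (p+i, c+start_i, c+start_i+len t_i).
def pvAmap : List String → Int → Int → List (Int × Int × Int)
  | [], _, _ => []
  | t :: ts, p, c => (p, c, c + PySem.Str.len t) :: pvAmap ts (p + 1) (c + PySem.Str.len t + 1)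

-- Reference start-offset table: 0, len t0 + 1, len t0 + len t1 + 2, …
def pvStarts : List String → List Int
  | [] => [0]
  | t :: ts => 0 :: (pvStarts ts).map (· + (PySem.Str.len t + 1))

-- A's fold characterized.
theorem pvAfold (ts : List String) (off j c0 : Int) (s0 : List Char) (m0 : List (Int × Int × Int)) :
    ((PySem.List.enumerate ts j).foldl
      (fun (acc : List Char × List (Int × Int × Int) × Int) p =>
        (acc.1 ++ p.2.toList ++ [' '],
         acc.2.1 ++ [(off + p.1, acc.2.2, acc.2.2 + PySem.Str.len p.2)],
         acc.2.2 + PySem.Str.len p.2 + 1))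
      (s0, m0, c0)) =
    (s0 ++ (ts.map (fun t => t.toList ++ [' '])).flatten,
     m0 ++ pvAmap ts (off + j) c0,
     c0 + ((ts.map (fun t => PySem.Str.len t + 1)).sum)) := by
  induction ts generalizing j c0 s0 m0 with
  | nil => simp [PySem.List.enumerate_nil, pvAmap]
  | cons t ts ih =>
    rw [PySem.List.enumerate_cons]
    simp only [List.foldl_cons]
    rw [ih]
    simp [pvAmap, List.map_cons, List.flatten_cons, List.sum_cons]
    and_intros <;> ring_nf

-- B's starts fold equals pvStarts shifted by the accumulator's last element.
theorem pvBstarts (ts : List String) (acc : List Int) (c : Int) :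
    (ts.foldl (fun st t => st ++ [PySem.List.pyGetD st (-1) 0 + PySem.Str.len t + 1]) (acc ++ [c])) =
    acc ++ (pvStarts ts).map (· + c) := by
  induction ts generalizing acc c with
  | nil => simp [pvStarts]
  | cons t ts ih =>
    simp only [List.foldl_cons, PySem.List.pyGetD_neg_one_append_singleton]
    rw [ih (acc ++ [c]) (c + PySem.Str.len t + 1)]
    simp only [pvStarts, List.map_cons, List.map_map, zero_add, List.append_assoc,
      List.singleton_append]
    congr 2
    apply List.map_congr_left; intro x _; dsimp; ring

-- enumerate with start s+1 is enumerate with start s, indices shifted by one.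
theorem pvEnum_shift {α : Type} (ts : List α) (s : Int) :
    PySem.List.enumerate ts (s + 1) = (PySem.List.enumerate ts s).map (fun q => (q.1 + 1, q.2)) := by
  induction ts generalizing s with
  | nil => simp [PySem.List.enumerate_nil]
  | cons t ts ih => simp [PySem.List.enumerate_cons, ih]

-- B's mapping equals pvAmap.
theorem pvBmap (ts : List String) (p c : Int) :
    (PySem.List.enumerate ts).map
      (fun q => (p + q.1,
                 PySem.List.pyGetD ((pvStarts ts).map (· + c)) q.1 0,
                 PySem.List.pyGetD ((pvStarts ts).map (· + c)) q.1 0 + PySem.Str.len q.2)) =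
    pvAmap ts p c := by
  induction ts generalizing p c with
  | nil => simp [PySem.List.enumerate_nil, pvAmap]
  | cons t ts ih =>
    rw [PySem.List.enumerate_cons]
    simp only [List.map_cons]
    have hcons : (pvStarts (t :: ts)).map (· + c) =
        (c : Int) :: ((pvStarts ts).map (· + (c + PySem.Str.len t + 1))) := by
      simp only [pvStarts, List.map_cons, List.map_map, zero_add]
      congr 1
      apply List.map_congr_left; intro x _; dsimp; ring
    have h0 : PySem.List.pyGetD ((pvStarts (t :: ts)).map (· + c)) 0 0 = c := by
      rw [hcons, PySem.List.pyGetD_zero_cons]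
    rw [h0]
    have hshift : ∀ q ∈ PySem.List.enumerate ts (0 + 1),
        (p + q.1,
         PySem.List.pyGetD ((pvStarts (t :: ts)).map (· + c)) q.1 0,
         PySem.List.pyGetD ((pvStarts (t :: ts)).map (· + c)) q.1 0 + PySem.Str.len q.2) =
        ((p + 1) + (q.1 - 1),
         PySem.List.pyGetD ((pvStarts ts).map (· + (c + PySem.Str.len t + 1))) (q.1 - 1) 0,
         PySem.List.pyGetD ((pvStarts ts).map (· + (c + PySem.Str.len t + 1))) (q.1 - 1) 0 + PySem.Str.len q.2) := by
      intro q hq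
      rcases (PySem.List.mem_enumerate_iff _ _ _).1 hq with ⟨k, hk, rfl⟩
      rw [show ((0 : Int) + 1 + k) - 1 = ((k : Nat) : Int) from by push_cast; ring]
      rw [show ((0 : Int) + 1 + k) = ((k + 1 : Nat) : Int) from by push_cast; ring]
      simp only [PySem.List.pyGetD_natCast, hcons, Prod.mk.injEq, List.getD_cons_succ]
      exact ⟨by push_cast; ring, trivial⟩
    rw [List.map_congr_left hshift, pvEnum_shift ts 0, List.map_map]
    have : ((fun q : Int × String => ((p + 1) + (q.1 - 1),
         PySem.List.pyGetD ((pvStarts ts).map (· + (c + PySem.Str.len t + 1))) (q.1 - 1) 0,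
         PySem.List.pyGetD ((pvStarts ts).map (· + (c + PySem.Str.len t + 1))) (q.1 - 1) 0 + PySem.Str.len q.2)) ∘
        (fun q : Int × String => (q.1 + 1, q.2))) =
        (fun q : Int × String => ((p + 1) + q.1,
         PySem.List.pyGetD ((pvStarts ts).map (· + (c + PySem.Str.len t + 1))) q.1 0,
         PySem.List.pyGetD ((pvStarts ts).map (· + (c + PySem.Str.len t + 1))) q.1 0 + PySem.Str.len q.2)) := by
      funext q; simp [Function.comp]
    rw [this, ih (p + 1) (c + PySem.Str.len t + 1)]
    simp [pvAmap]

-- dropLast of "each token plus a space" flattened is the single-space intercalation.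
theorem pvDropLast_flatten (ts : List String) :
    ((ts.map (fun t => t.toList ++ [' '])).flatten).dropLast =
    [' '].intercalate (ts.map String.toList) := by
  induction ts with
  | nil => simp [List.intercalate]
  | cons t ts ih =>
    cases ts with
    | nil => simp [List.intercalate]
    | cons u us =>
      rw [List.map_cons, List.flatten_cons, List.dropLast_append_of_ne_nil]
      · rw [ih]
        simp [List.intercalate]
      · simp

-- ===== VERDICT (by name: the statement is the Claim_ definition above) =====
theorem detokenize_sentence_spec : Claim_equal_detokenize_sentence := by
  intro tokens off _
  show _ = _
  unfold detokenize_sentence detokenize_sentence_alt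
  rw [pvAfold tokens off 0 0 [] []]
  have hstarts := pvBstarts tokens [] 0
  simp only [List.nil_append] at hstarts
  rw [hstarts]
  simp only [List.nil_append, Prod.mk.injEq]
  constructor
  · rw [PySem.List.slice_to_neg_one, pvDropLast_flatten]
    simp [PySem.Str.join, PySem.Chars.join]
  · rw [add_zero, ← pvBmap tokens off 0]
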